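-- pv_equiv track=rewrite | github.com/andrzeng/Neural-turing-machines | JAX/utils.py | chunksize_to_index
-- ===== SOURCE A (Python) =====
-- def chunksize_to_index(chunk_sizes: list) -> list:
--     """
--         Description:
--             Given a size-wise list of blocks, return the cumulative size sum at each block
--
--         Args:
--             chunk_sizes (list): List of chunk sizes
--
--         Returns:
--             list: The cumulative chunk sizes
--     """
--     indices = []
--     for index, _ in enumerate(chunk_sizes):
--         if(index == 0):
--             indices.append(chunk_sizes[index])
--         else:
--             indices.append(indices[index-1] + chunk_sizes[index])
--     return indices
-- ===== SOURCE B (Python) =====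
-- def chunksize_to_index(chunk_sizes: list) -> list:
--     # Two-pass, back-to-front: the last cumulative value is the total sum;
--     # walk the list in reverse, recording the running remainder before each chunk.
--     total = sum(chunk_sizes)
--     out = []
--     for size in reversed(chunk_sizes):
--         out.append(total)
--         total -= size
--     out.reverse()
--     return out
-- ===== Notes on version B (the rewrite author's own statement) =====
-- stated objective: alternative
-- what changed: Instead of A's forward append loop that re-reads its own previous output (indices[index-1]), B computes the total sum first and then builds the result back-to-front over reversed(chunk_sizes) by subtracting each chunk size, reversing at the end.
import Mathlib
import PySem

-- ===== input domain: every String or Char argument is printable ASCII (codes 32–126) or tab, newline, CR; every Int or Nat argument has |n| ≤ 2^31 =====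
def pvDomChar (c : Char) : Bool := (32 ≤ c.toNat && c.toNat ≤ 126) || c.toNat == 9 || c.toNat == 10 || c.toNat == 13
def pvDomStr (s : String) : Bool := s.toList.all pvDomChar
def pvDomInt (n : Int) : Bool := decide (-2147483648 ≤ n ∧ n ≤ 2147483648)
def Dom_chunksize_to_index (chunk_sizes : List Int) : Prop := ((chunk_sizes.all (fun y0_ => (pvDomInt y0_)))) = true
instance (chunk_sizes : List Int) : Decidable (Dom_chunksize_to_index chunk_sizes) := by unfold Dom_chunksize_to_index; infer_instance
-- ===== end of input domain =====

-- B replaces A's forward self-referencing append loop by a two-pass algorithm: total sum first, then a reverse walk subtracting each chunk size; objective: alternative.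


-- ===== PORT A =====
-- A's indexing indices[index-1] / chunk_sizes[index] is always in range in this loop,
-- so pyGetD with default 0 is exact here.
def chunksize_to_index (chunk_sizes : List Int) : List Int :=
  (PySem.List.enumerate chunk_sizes).foldl
    (fun indices p =>
      if p.1 = 0 then
        indices ++ [PySem.List.pyGetD chunk_sizes p.1 0]
      else
        indices ++ [PySem.List.pyGetD indices (p.1 - 1) 0 + PySem.List.pyGetD chunk_sizes p.1 0])
    []

-- ===== PORT B =====
-- the reverse loop of Source B: state is (out, total); appends total, then subtracts size
def chunksizeRevLoop (total : Int) : List Int → List Int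
  | [] => []
  | x :: xs => total :: chunksizeRevLoop (total - x) xs

def chunksize_to_index_alt (chunk_sizes : List Int) : List Int :=
  (chunksizeRevLoop chunk_sizes.sum chunk_sizes.reverse).reverse

-- ===== PRECONDITION & SPEC =====
def Spec_chunksize_to_index (chunk_sizes : List Int) (out : List Int) : Prop := out = chunksize_to_index_alt chunk_sizes
instance (chunk_sizes : List Int) (out : List Int) : Decidable (Spec_chunksize_to_index chunk_sizes out) := by unfold Spec_chunksize_to_index; infer_instance

-- ===== CLAIM (what is proved, stated in full; the proofs are below) =====
def Claim_equal_chunksize_to_index : Prop := ∀ (chunk_sizes : List Int), Dom_chunksize_to_index chunk_sizes → Spec_chunksize_to_index chunk_sizes (chunksize_to_index chunk_sizes)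

-- ===== LEMMAS AND PROOFS =====

-- proof-side specification: prefix sums starting from t
def prefixGo (t : Int) : List Int → List Int
  | [] => []
  | x :: xs => (t + x) :: prefixGo (t + x) xs

theorem pyGetD_append_singleton_len (pre : List Int) (acc : Int) :
    PySem.List.pyGetD (pre ++ [acc]) ((pre.length : Int)) 0 = acc := by
  rw [PySem.List.pyGetD_natCast]
  simp [List.getD]

theorem pyGetD_append_cons_len (done : List Int) (x : Int) (rest : List Int) :
    PySem.List.pyGetD (done ++ x :: rest) ((done.length : Int)) 0 = x := by
  rw [PySem.List.pyGetD_natCast]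
  simp [List.getD]

-- invariant of A's loop after the first iteration: state is pre ++ [acc], remaining
-- enumerate entries start at index done.length = pre.length + 1
theorem loopA_main (cs : List Int) : ∀ (rest done pre : List Int) (acc : Int),
    cs = done ++ rest → done.length = pre.length + 1 →
    (PySem.List.enumerate rest ((done.length : Int))).foldl
      (fun indices p =>
        if p.1 = 0 then
          indices ++ [PySem.List.pyGetD cs p.1 0]
        else
          indices ++ [PySem.List.pyGetD indices (p.1 - 1) 0 + PySem.List.pyGetD cs p.1 0])
      (pre ++ [acc])
    = (pre ++ [acc]) ++ prefixGo acc rest := by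
  intro rest
  induction rest with
  | nil => intro done pre acc _ _; simp [PySem.List.enumerate_nil, prefixGo]
  | cons x xs ih =>
    intro done pre acc hcs hlen
    rw [PySem.List.enumerate_cons, List.foldl_cons]
    have hne : ((done.length : Int)) ≠ 0 := by
      have : 0 < done.length := by omega
      omega
    rw [if_neg hne]
    have h1 : PySem.List.pyGetD (pre ++ [acc]) ((done.length : Int) - 1) 0 = acc := by
      have : ((done.length : Int)) - 1 = ((pre.length : Int)) := by
        rw [hlen]; push_cast; ring
      rw [this, pyGetD_append_singleton_len]
    have h2 : PySem.List.pyGetD cs ((done.length : Int)) 0 = x := by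
      rw [hcs]; exact pyGetD_append_cons_len done x xs
    rw [h1, h2]
    have hstep := ih (done ++ [x]) (pre ++ [acc]) (acc + x)
      (by rw [hcs]; simp) (by simp [hlen])
    simp only [List.length_append, List.length_singleton] at hstep
    have : ((done.length : Int)) + 1 = (((done.length + 1 : Nat)) : Int) := by push_cast; ring
    rw [this]
    simp only [List.append_assoc, List.singleton_append] at hstep ⊢
    rw [hstep]
    simp [prefixGo]

-- A computes the prefix sums starting from 0
theorem portA_eq_prefixGo (cs : List Int) : chunksize_to_index cs = prefixGo 0 cs := by
  unfold chunksize_to_index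
  cases cs with
  | nil => simp [PySem.List.enumerate_nil, prefixGo]
  | cons x xs =>
    rw [PySem.List.enumerate_cons, List.foldl_cons]
    rw [if_pos rfl]
    have h0 : PySem.List.pyGetD (x :: xs) (0 : Int) 0 = x := by
      simp [PySem.List.pyGetD_zero_cons]
    simp only [List.nil_append]
    rw [h0]
    have := loopA_main (x :: xs) xs [x] [] x (by simp) (by simp)
    simp only [List.length_singleton, List.nil_append] at this
    rw [show ((0:Int)+1) = ((1:Nat):Int) by norm_num]
    rw [this]
    simp [prefixGo]

theorem revLoop_append (ys : List Int) : ∀ (t x : Int),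
    chunksizeRevLoop t (ys ++ [x]) = chunksizeRevLoop t ys ++ [t - ys.sum] := by
  induction ys with
  | nil => intro t x; simp [chunksizeRevLoop]
  | cons y ys ih =>
    intro t x
    simp only [List.cons_append, chunksizeRevLoop, ih, List.sum_cons]
    congr 2
    ring

-- B computes the prefix sums starting from t when seeded with t + sum
theorem portB_eq_prefixGo (cs : List Int) : ∀ (t : Int),
    (chunksizeRevLoop (t + cs.sum) cs.reverse).reverse = prefixGo t cs := by
  induction cs with
  | nil => intro t; simp [chunksizeRevLoop, prefixGo]
  | cons x xs ih =>
    intro t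
    rw [List.reverse_cons, revLoop_append]
    have hsum : (xs.reverse).sum = xs.sum := List.sum_reverse xs
    rw [hsum]
    have h1 : t + (x :: xs).sum - xs.sum = t + x := by simp only [List.sum_cons]; ring
    have h2 : t + (x :: xs).sum = (t + x) + xs.sum := by simp only [List.sum_cons]; ring
    rw [h1, h2]
    simp only [List.reverse_append, List.reverse_cons, List.reverse_nil, List.nil_append,
      List.cons_append, prefixGo]
    rw [ih (t + x)]

-- ===== VERDICT (by name: the statement is the Claim_ definition above) =====
theorem chunksize_to_index_spec : Claim_equal_chunksize_to_index := by
  intro cs _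
  unfold Spec_chunksize_to_index chunksize_to_index_alt
  rw [portA_eq_prefixGo]
  have := portB_eq_prefixGo cs 0
  rw [show cs.sum = 0 + cs.sum from (zero_add cs.sum).symm]
  exact this.symm
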